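-- pv_equiv track=rewrite | github.com/jamesben6688/coding | hash/最长连续.py | beautiful_values
-- ===== SOURCE A (Python) =====
-- def beautiful_values(arr, targets):
--     targets = set(targets)  # 转为 set 加速查询
--     streaks = {t: 0 for t in targets}
--     current = {t: 0 for t in targets}
--
--     for item in arr:
--         for t in targets:
--             if item == t:
--                 current[t] += 1
--                 streaks[t] = max(streaks[t], current[t])
--             else:
--                 current[t] = 0
--     return streaks
-- ===== SOURCE B (Python) =====
-- def beautiful_values(arr, targets):
--     # One pass: maintain the current run length of the value just seen and
--     # the best run length per value; then answer each distinct target by lookup.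
--     best = {}
--     prev = None
--     run = 0
--     for x in arr:
--         run = run + 1 if x == prev else 1
--         prev = x
--         if run > best.get(x, 0):
--             best[x] = run
--     return {t: best.get(t, 0) for t in set(targets)}
-- ===== Notes on version B (the rewrite author's own statement) =====
-- stated objective: faster
-- what changed: Replaces the per-target inner loop (a current/streak counter updated for every target on every element) by a single pass over arr maintaining one shared run counter and a dict of best run lengths per value, answering targets by dict lookup.
import Mathlib
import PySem

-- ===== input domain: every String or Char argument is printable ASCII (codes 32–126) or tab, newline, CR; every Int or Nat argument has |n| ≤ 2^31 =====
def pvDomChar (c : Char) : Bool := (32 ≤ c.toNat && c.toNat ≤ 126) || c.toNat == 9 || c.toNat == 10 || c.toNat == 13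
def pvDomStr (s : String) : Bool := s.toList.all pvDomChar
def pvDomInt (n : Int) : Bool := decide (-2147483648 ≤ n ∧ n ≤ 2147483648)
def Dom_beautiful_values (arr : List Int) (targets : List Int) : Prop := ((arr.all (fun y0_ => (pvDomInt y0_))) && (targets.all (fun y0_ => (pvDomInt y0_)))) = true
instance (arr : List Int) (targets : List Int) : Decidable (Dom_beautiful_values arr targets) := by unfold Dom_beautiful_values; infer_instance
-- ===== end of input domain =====

-- B replaces A's per-target inner loop by a single pass over arr with one shared
-- run counter and a dict of best run lengths, answered by lookup per target (faster).

-- ===== PORT A =====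
-- the dict output is an association list in A's key-insertion order (set(targets) order)
def beautiful_values (arr : List Int) (targets : List Int) : List (Int × Int) :=
  let ts : PySem.Set Int := PySem.Set.ofList targets
  let streaks := ts.foldl (fun d t => d.insert t 0) (PySem.Dict.empty : PySem.Dict Int Int)
  let current := ts.foldl (fun d t => d.insert t 0) (PySem.Dict.empty : PySem.Dict Int Int)
  let sc := arr.foldl (fun (sc : PySem.Dict Int Int × PySem.Dict Int Int) item =>
    ts.foldl (fun (sc : PySem.Dict Int Int × PySem.Dict Int Int) t =>
      if item = t then
        let cur := sc.2.insert t (sc.2.getD t 0 + 1)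
        (sc.1.insert t (max (sc.1.getD t 0) (cur.getD t 0)), cur)
      else
        (sc.1, sc.2.insert t 0)) sc) (streaks, current)
  sc.1.items

-- ===== PORT B =====
def beautiful_values_alt (arr : List Int) (targets : List Int) : List (Int × Int) :=
  let st := arr.foldl (fun (st : Option Int × Int × PySem.Dict Int Int) x =>
    let run := if some x = st.1 then st.2.1 + 1 else 1
    let best := if run > st.2.2.getD x 0 then st.2.2.insert x run else st.2.2
    (some x, run, best)) (none, 0, (PySem.Dict.empty : PySem.Dict Int Int))
  (PySem.Set.ofList targets).map (fun t => (t, st.2.2.getD t 0))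

-- ===== PRECONDITION & SPEC =====
def Spec_beautiful_values (arr : List Int) (targets : List Int) (out : List (Int × Int)) : Prop := out = beautiful_values_alt arr targets
instance (arr : List Int) (targets : List Int) (out : List (Int × Int)) : Decidable (Spec_beautiful_values arr targets out) := by unfold Spec_beautiful_values; infer_instance

-- ===== CLAIM (what is proved, stated in full; the proofs are below) =====
def Claim_equal_beautiful_values : Prop := ∀ (arr : List Int) (targets : List Int), Dom_beautiful_values arr targets → Spec_beautiful_values arr targets (beautiful_values arr targets)

-- ===== LEMMAS AND PROOFS =====

-- a dict tabulating f over the keys ts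
def pvTab (ts : List Int) (f : Int → Int) : PySem.Dict Int Int :=
  PySem.Dict.mk (ts.map (fun t => (t, f t)))

theorem pvTab_congr (ts : List Int) (f g : Int → Int) (h : ∀ u ∈ ts, f u = g u) :
    pvTab ts f = pvTab ts g := by
  unfold pvTab
  congr 1
  exact List.map_congr_left (fun u hu => by rw [h u hu])

theorem keys_pvTab (ts : List Int) (f : Int → Int) : (pvTab ts f).keys = ts := by
  simp [pvTab, PySem.Dict.keys, Function.comp_def]

theorem contains_pvTab (ts : List Int) (f : Int → Int) (t : Int) (ht : t ∈ ts) :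
    (pvTab ts f).contains t = true := by
  rw [PySem.Dict.contains_iff_mem_keys, keys_pvTab]; exact ht

theorem getD_pvTab (ts : List Int) (hnd : ts.Nodup) (f : Int → Int) (t : Int) (ht : t ∈ ts) :
    (pvTab ts f).getD t 0 = f t := by
  apply PySem.Dict.getD_of_mem_items
  · exact List.mem_map_of_mem ht
  · rw [keys_pvTab]; exact hnd

theorem insert_pvTab (ts : List Int) (f : Int → Int) (t : Int) (ht : t ∈ ts) (v : Int) :
    (pvTab ts f).insert t v = pvTab ts (fun u => if u = t then v else f u) := by
  apply PySem.Dict.ext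
  rw [PySem.Dict.items_insert_of_contains _ _ (contains_pvTab ts f t ht)]
  simp only [pvTab, List.map_map]
  apply List.map_congr_left
  intro u _
  by_cases h : u = t <;> simp [h]

-- scalar evolution of A's per-target streak/current counters
def pvSStep (item : Int) (s c : Int → Int) : Int → Int :=
  fun u => if item = u then max (s u) (c u + 1) else s u

def pvCStep (item : Int) (c : Int → Int) : Int → Int :=
  fun u => if item = u then c u + 1 else 0

def pvS : List Int → (Int → Int) → (Int → Int) → (Int → Int)
  | [], s, _ => s
  | x :: xs, s, c => pvS xs (pvSStep x s c) (pvCStep x c)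

-- the initial dicts are tabulations of the zero function
theorem init_aux : ∀ (l : List Int) (d : PySem.Dict Int Int), l.Nodup →
    (∀ t ∈ l, d.contains t = false) →
    (l.foldl (fun d t => d.insert t 0) d).items = d.items ++ l.map (fun t => (t, (0 : Int)))
  | [], d, _, _ => by simp
  | t :: l, d, hnd, hfresh => by
    rw [List.foldl_cons]
    have htl : t ∉ l := (List.nodup_cons.mp hnd).1
    have h1 : (d.insert t 0).items = d.items ++ [(t, (0 : Int))] :=
      PySem.Dict.items_insert_of_not_contains _ _ (hfresh t List.mem_cons_self)
    rw [init_aux l (d.insert t 0) (List.nodup_cons.mp hnd).2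
      (fun u hu => by
        rw [PySem.Dict.contains_insert]
        have hut : ¬ u = t := fun h => htl (h ▸ hu)
        simp [hut, hfresh u (List.mem_cons_of_mem _ hu)]), h1]
    simp

theorem init_pvTab (ts : List Int) (hnd : ts.Nodup) :
    ts.foldl (fun d t => d.insert t 0) (PySem.Dict.empty : PySem.Dict Int Int)
      = pvTab ts (fun _ => 0) := by
  apply PySem.Dict.ext
  rw [init_aux ts PySem.Dict.empty hnd (fun t _ => PySem.Dict.contains_empty t)]
  simp [pvTab, PySem.Dict.empty]

-- A's inner loop over a sublist l of the key set ts, on tabulated dicts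
theorem inner_loop (ts : List Int) (hnd : ts.Nodup) (item : Int) :
    ∀ (l : List Int), l.Nodup → (∀ x ∈ l, x ∈ ts) → ∀ (s c : Int → Int),
    (l.foldl (fun (sc : PySem.Dict Int Int × PySem.Dict Int Int) t =>
      if item = t then
        let cur := sc.2.insert t (sc.2.getD t 0 + 1)
        (sc.1.insert t (max (sc.1.getD t 0) (cur.getD t 0)), cur)
      else
        (sc.1, sc.2.insert t 0)) (pvTab ts s, pvTab ts c))
    = (pvTab ts (fun u => if u ∈ l ∧ item = u then max (s u) (c u + 1) else s u),
       pvTab ts (fun u => if u ∈ l then (if item = u then c u + 1 else 0) else c u)) := by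
  intro l
  induction l with
  | nil =>
    intro _ _ s c
    simp
  | cons t l ih =>
    intro hndl hsub s c
    have ht : t ∈ ts := hsub t (List.mem_cons_self)
    have htl : t ∉ l := (List.nodup_cons.mp hndl).1
    have hndl' : l.Nodup := (List.nodup_cons.mp hndl).2
    have hsub' : ∀ x ∈ l, x ∈ ts := fun x hx => hsub x (List.mem_cons_of_mem _ hx)
    rw [List.foldl_cons]
    by_cases hit : item = t
    · subst hit
      rw [if_pos rfl]
      show (l.foldl _ (((pvTab ts s).insert item _), ((pvTab ts c).insert item _))) = _
      have hcg : (pvTab ts c).getD item 0 = c item := getD_pvTab ts hnd c item ht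
      have hsg : (pvTab ts s).getD item 0 = s item := getD_pvTab ts hnd s item ht
      rw [hcg, hsg, insert_pvTab ts c item ht]
      have hg : (pvTab ts (fun u => if u = item then c item + 1 else c u)).getD item 0
          = c item + 1 := by
        rw [getD_pvTab ts hnd _ item ht]; simp
      rw [hg, insert_pvTab ts s item ht, ih hndl' hsub']
      simp only [Prod.mk.injEq]
      constructor <;> (apply pvTab_congr; intro u hu) <;> by_cases hut : u = item
      · subst hut; simp [htl]
      · have h2 : ¬ item = u := fun h => hut h.symm
        simp [hut, h2]
      · subst hut; simp [htl]
      · have h2 : ¬ item = u := fun h => hut h.symm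
        simp [hut, h2]
    · rw [if_neg hit]
      show (l.foldl _ ((pvTab ts s), ((pvTab ts c).insert t 0))) = _
      rw [insert_pvTab ts c t ht, ih hndl' hsub']
      simp only [Prod.mk.injEq]
      constructor <;> (apply pvTab_congr; intro u hu) <;> by_cases hut : u = t
      · subst hut; simp [hit]
      · simp [hut]
      · subst hut; simp [htl, hit]
      · simp [hut]

-- A's outer loop: the streak dict tabulates the scalar recursion pvS
theorem outer_loop (ts : List Int) (hnd : ts.Nodup) :
    ∀ (arr : List Int) (s c : Int → Int),
    (arr.foldl (fun (sc : PySem.Dict Int Int × PySem.Dict Int Int) item =>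
      ts.foldl (fun (sc : PySem.Dict Int Int × PySem.Dict Int Int) t =>
        if item = t then
          let cur := sc.2.insert t (sc.2.getD t 0 + 1)
          (sc.1.insert t (max (sc.1.getD t 0) (cur.getD t 0)), cur)
        else
          (sc.1, sc.2.insert t 0)) sc) (pvTab ts s, pvTab ts c)).1
    = pvTab ts (fun u => pvS arr s c u) := by
  intro arr
  induction arr with
  | nil => intro s c; rfl
  | cons x xs ih =>
    intro s c
    rw [List.foldl_cons, inner_loop ts hnd x ts hnd (fun _ h => h) s c]
    have h1 : pvTab ts (fun u => if u ∈ ts ∧ x = u then max (s u) (c u + 1) else s u)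
        = pvTab ts (pvSStep x s c) := by
      apply pvTab_congr; intro u hu
      simp [pvSStep, hu]
    have h2 : pvTab ts (fun u => if u ∈ ts then (if x = u then c u + 1 else 0) else c u)
        = pvTab ts (pvCStep x c) := by
      apply pvTab_congr; intro u hu
      simp [pvCStep, hu]
    rw [h1, h2, ih]
    rfl

-- B's loop: the best dict's lookups follow the same scalar recursion pvS
theorem alt_loop :
    ∀ (arr : List Int) (prev : Option Int) (run : Int) (best : PySem.Dict Int Int)
      (s c : Int → Int),
    (∀ u, best.getD u 0 = s u) →
    (∀ u, c u = if some u = prev then run else 0) →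
    ∀ u, ((arr.foldl (fun (st : Option Int × Int × PySem.Dict Int Int) x =>
      let run := if some x = st.1 then st.2.1 + 1 else 1
      let best := if run > st.2.2.getD x 0 then st.2.2.insert x run else st.2.2
      (some x, run, best)) (prev, run, best)).2.2).getD u 0 = pvS arr s c u := by
  intro arr
  induction arr with
  | nil =>
    intro prev run best s c hbest _ u
    exact hbest u
  | cons x xs ih =>
    intro prev run best s c hbest hc u
    rw [List.foldl_cons]
    have hrun : (if some x = prev then run + 1 else 1) = c x + 1 := by
      rw [hc x]; split_ifs <;> omega
    apply ih
    · intro v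
      show (if (if some x = prev then run + 1 else 1) > best.getD x 0 then
              best.insert x (if some x = prev then run + 1 else 1) else best).getD v 0
            = pvSStep x s c v
      rw [hrun, pvSStep]
      by_cases hgt : c x + 1 > best.getD x 0
      · rw [if_pos hgt, PySem.Dict.getD_insert]
        by_cases hv : v = x
        · subst hv
          rw [if_pos rfl, if_pos rfl]
          rw [hbest v] at hgt
          omega
        · rw [if_neg hv, if_neg (fun h : x = v => hv h.symm), hbest v]
      · rw [if_neg hgt, hbest v]
        by_cases hv : x = v
        · subst hv
          rw [if_pos rfl]
          rw [hbest x] at hgt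
          omega
        · rw [if_neg hv]
    · intro v
      show pvCStep x c v = if some v = some x then (if some x = prev then run + 1 else 1) else 0
      rw [hrun, pvCStep]
      by_cases hv : v = x
      · subst hv; simp
      · have hxv : ¬ x = v := fun h => hv h.symm
        simp [hv, hxv]

theorem beautiful_values_eq (arr targets : List Int) :
    beautiful_values arr targets =
    ((arr.foldl (fun (sc : PySem.Dict Int Int × PySem.Dict Int Int) item =>
      (PySem.Set.ofList targets).foldl (fun (sc : PySem.Dict Int Int × PySem.Dict Int Int) t =>
        if item = t then
          let cur := sc.2.insert t (sc.2.getD t 0 + 1)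
          (sc.1.insert t (max (sc.1.getD t 0) (cur.getD t 0)), cur)
        else
          (sc.1, sc.2.insert t 0)) sc)
      ((PySem.Set.ofList targets).foldl (fun d t => d.insert t 0) PySem.Dict.empty,
       (PySem.Set.ofList targets).foldl (fun d t => d.insert t 0) PySem.Dict.empty)).1).items := rfl

theorem beautiful_values_alt_eq (arr targets : List Int) :
    beautiful_values_alt arr targets =
    (PySem.Set.ofList targets).map (fun t => (t,
      ((arr.foldl (fun (st : Option Int × Int × PySem.Dict Int Int) x =>
        let run := if some x = st.1 then st.2.1 + 1 else 1
        let best := if run > st.2.2.getD x 0 then st.2.2.insert x run else st.2.2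
        (some x, run, best)) (none, 0, PySem.Dict.empty)).2.2).getD t 0)) := rfl

-- ===== VERDICT (by name: the statement is the Claim_ definition above) =====
theorem beautiful_values_spec : Claim_equal_beautiful_values := by
  intro arr targets _
  unfold Spec_beautiful_values
  rw [beautiful_values_eq, beautiful_values_alt_eq]
  have hnd : (PySem.Set.ofList targets).Nodup := PySem.Set.nodup_ofList targets
  rw [init_pvTab _ hnd, outer_loop _ hnd arr (fun _ => 0) (fun _ => 0)]
  show ((PySem.Set.ofList targets).map _) = _
  apply List.map_congr_left
  intro t _
  rw [alt_loop arr none 0 PySem.Dict.empty (fun _ => 0) (fun _ => 0)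
    (fun u => PySem.Dict.getD_empty u 0) (fun u => by simp)]
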